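-- pv_equiv track=rewrite | github.com/divinenaman/basic-coding-lib | Array/perfect_peak_of_array.py | perfectPeak
-- ===== SOURCE A (Python) =====
-- def perfectPeak(A):
--
--     max_prefix = [0] * len(A)
--     min_suffix = [0] * len(A)
--
--     max_prefix[0] = A[0]
--     min_suffix[len(A)-1] = A[len(A)-1]
--
--     for i in range(1, len(A) - 1):
--         max_prefix[i] = max(max_prefix[i-1], A[i])
--
--     for i in range(len(A) - 2, 0, -1):
--         min_suffix[i] = min(min_suffix[i+1], A[i])
--
--     found = -1
--     for i in range(1, len(A) - 1):
--         if max_prefix[i] == min_suffix[i] and max_prefix[i] == A[i]: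
--             found = A[i]
--
--     if found == -1:
--         return 0
--     else:
--         count = 0
--         for i in range(len(A)):
--             if A[i] == found:
--                 count += 1
--         if count == 1:
--             return 1
--         else:
--             return 0
-- ===== SOURCE B (Python) =====
-- def perfectPeak(A):
--     found = -1
--     for i in range(1, len(A) - 1):
--         if A[i] == max(A[:i+1]) and A[i] == min(A[i:]):
--             found = A[i]
--     if found == -1:
--         return 0
--     return 1 if A.count(found) == 1 else 0
-- ===== Notes on version B (the rewrite author's own statement) =====
-- stated objective: simpler
-- what changed: Drops both auxiliary prefix-max and suffix-min tables and the hand-written count loop: a single scan checks each candidate directly against max of its prefix and min of its suffix, and uses list.count for uniqueness.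
-- crash fix: On the empty list A raises IndexError (it reads A[0]); B returns 0. — e.g. on perfectPeak([]): A raises IndexError, B returns 0
import Mathlib
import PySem

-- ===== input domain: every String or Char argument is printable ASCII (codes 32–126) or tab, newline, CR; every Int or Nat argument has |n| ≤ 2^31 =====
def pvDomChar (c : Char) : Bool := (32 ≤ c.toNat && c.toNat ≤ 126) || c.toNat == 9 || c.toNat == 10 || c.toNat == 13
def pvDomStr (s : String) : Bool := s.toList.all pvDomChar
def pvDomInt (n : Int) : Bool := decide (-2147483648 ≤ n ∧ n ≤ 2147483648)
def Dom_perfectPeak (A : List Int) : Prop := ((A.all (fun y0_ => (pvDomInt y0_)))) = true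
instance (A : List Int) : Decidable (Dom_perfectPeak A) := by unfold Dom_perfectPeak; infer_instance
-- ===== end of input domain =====

-- B drops the prefix-max/suffix-min tables and the hand-written count loop: one scan checks each
-- candidate against max of its prefix / min of its suffix and uses list.count (simpler, not faster).

-- ===== PORT A =====
def perfectPeak (A : List Int) : Int :=
  let n : Int := (A.length : Int)
  let mp1 : List Int := PySem.List.pySetD (List.replicate A.length (0 : Int)) 0 (PySem.List.pyGetD A 0 0)
  let ms1 : List Int := PySem.List.pySetD (List.replicate A.length (0 : Int)) (n - 1) (PySem.List.pyGetD A (n - 1) 0)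
  let mp : List Int := (PySem.List.pyRange 1 (n - 1) 1).foldl
      (fun mp i => PySem.List.pySetD mp i (max (PySem.List.pyGetD mp (i - 1) 0) (PySem.List.pyGetD A i 0))) mp1
  let ms : List Int := (PySem.List.pyRange (n - 2) 0 (-1)).foldl
      (fun ms i => PySem.List.pySetD ms i (min (PySem.List.pyGetD ms (i + 1) 0) (PySem.List.pyGetD A i 0))) ms1
  let found : Int := (PySem.List.pyRange 1 (n - 1) 1).foldl
      (fun found i =>
        if PySem.List.pyGetD mp i 0 == PySem.List.pyGetD ms i 0 && PySem.List.pyGetD mp i 0 == PySem.List.pyGetD A i 0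
        then PySem.List.pyGetD A i 0 else found) (-1)
  if found = -1 then 0
  else
    let count : Int := (PySem.List.pyRange 0 n 1).foldl
      (fun c i => if PySem.List.pyGetD A i 0 == found then c + 1 else c) 0
    if count = 1 then 1 else 0

-- ===== PORT B =====
def perfectPeak_alt (A : List Int) : Int :=
  let n : Int := (A.length : Int)
  let found : Int := (PySem.List.pyRange 1 (n - 1) 1).foldl
      (fun found i =>
        if PySem.List.pyGetD A i 0 == (PySem.List.max? (PySem.List.slice A none (some (i + 1))) (fun x => x)).getD 0
            && PySem.List.pyGetD A i 0 == (PySem.List.min? (PySem.List.slice A (some i) none) (fun x => x)).getD 0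
        then PySem.List.pyGetD A i 0 else found) (-1)
  if found = -1 then 0
  else if PySem.List.count A found = 1 then 1 else 0

-- ===== PRECONDITION & SPEC =====
-- Pre_ excludes only the empty list, on which A raises IndexError (it reads A[0]).
def Pre_perfectPeak (A : List Int) : Prop := A ≠ []
instance (A : List Int) : Decidable (Pre_perfectPeak A) := by unfold Pre_perfectPeak; infer_instance
def pvWitness_perfectPeak : List Int := [1, 2, 3]

-- On the empty list A raises IndexError (it reads A[0]); B returns 0.
def Raises_perfectPeak (A : List Int) : Prop := A = []
instance (A : List Int) : Decidable (Raises_perfectPeak A) := by unfold Raises_perfectPeak; infer_instance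
def pvRaiseWitness_perfectPeak : List Int := []
def pvRaiseWitnessOut_perfectPeak : Int := 0

def Spec_perfectPeak (A : List Int) (out : Int) : Prop := out = perfectPeak_alt A
instance (A : List Int) (out : Int) : Decidable (Spec_perfectPeak A out) := by unfold Spec_perfectPeak; infer_instance

-- ===== CLAIM (what is proved, stated in full; the proofs are below) =====
def Claim_equal_perfectPeak : Prop := ∀ (A : List Int), Dom_perfectPeak A → Pre_perfectPeak A → Spec_perfectPeak A (perfectPeak A)
def Claim_raises_perfectPeak : Prop := (∀ (A : List Int), Dom_perfectPeak A → Raises_perfectPeak A → ¬ Pre_perfectPeak A) ∧ (Dom_perfectPeak (pvRaiseWitness_perfectPeak) ∧ Raises_perfectPeak (pvRaiseWitness_perfectPeak) ∧ perfectPeak_alt (pvRaiseWitness_perfectPeak) = pvRaiseWitnessOut_perfectPeak)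

-- ===== LEMMAS AND PROOFS =====

def pvPmax (a : Int) (t : List Int) (j : Nat) : Int := (t.take j).foldl max a
def pvSmin (A : List Int) (j : Nat) : Int := match A.drop j with | [] => 0 | b :: r => r.foldl min b

lemma pvGetD_set_self (l : List Int) (i : Nat) (v d : Int) (h : i < l.length) : (l.set i v).getD i d = v := by
  simp [List.getD, h]

lemma pvGetD_set_ne (l : List Int) (i j : Nat) (v d : Int) (h : j ≠ i) : (l.set i v).getD j d = l.getD j d := by
  simp [List.getD]
  rw [List.getElem?_set_ne (by omega)]

lemma pvFoldl_min_min (l : List Int) : ∀ x y : Int, l.foldl min (min x y) = min x (l.foldl min y) := by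
  induction l with
  | nil => intro x y; rfl
  | cons c l ih =>
    intro x y
    simp only [List.foldl_cons]
    rw [min_assoc, ih]

lemma pvPmax_succ (a : Int) (t : List Int) (j : Nat) (h : j < t.length) :
    pvPmax a t (j + 1) = max (pvPmax a t j) (t.getD j 0) := by
  unfold pvPmax
  rw [List.take_add_one, List.getElem?_eq_getElem h]
  simp only [Option.toList_some, List.foldl_append, List.foldl_cons, List.foldl_nil]
  simp [List.getD, List.getElem?_eq_getElem h]

lemma pvSmin_eq (A : List Int) (j : Nat) (h : j + 1 < A.length) :
    pvSmin A j = min (pvSmin A (j + 1)) (A.getD j 0) := by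
  have h0 : j < A.length := by omega
  have hd : A.drop j = A[j] :: A.drop (j + 1) := List.drop_eq_getElem_cons h0
  obtain ⟨b, r, hbr⟩ := List.exists_cons_of_ne_nil (l := A.drop (j + 1))
    (by intro hnil; have := List.drop_eq_nil_iff.mp hnil; omega)
  unfold pvSmin
  rw [hd, hbr]
  simp only [List.foldl_cons]
  rw [min_comm (List.foldl min b r) _, ← pvFoldl_min_min]
  simp [List.getD, List.getElem?_eq_getElem h0]

lemma pvMpLoop (a : Int) (t : List Int) (m : Nat) (hm : m + 1 ≤ t.length) :
    (((PySem.List.pyRange 1 (1 + (m : Int))).foldl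
        (fun mp i => PySem.List.pySetD mp i (max (PySem.List.pyGetD mp (i - 1) 0) (PySem.List.pyGetD (a :: t) i 0)))
        (PySem.List.pySetD (List.replicate (a :: t).length (0 : Int)) 0 (PySem.List.pyGetD (a :: t) 0 0))).length = (a :: t).length ∧
     ∀ j : Nat, j ≤ m →
      ((PySem.List.pyRange 1 (1 + (m : Int))).foldl
        (fun mp i => PySem.List.pySetD mp i (max (PySem.List.pyGetD mp (i - 1) 0) (PySem.List.pyGetD (a :: t) i 0)))
        (PySem.List.pySetD (List.replicate (a :: t).length (0 : Int)) 0 (PySem.List.pyGetD (a :: t) 0 0))).getD j 0 = pvPmax a t j) := by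
  induction m with
  | zero =>
    rw [PySem.List.pyRange_one_eq_nil (by omega)]
    simp only [List.foldl_nil]
    constructor
    · simp [PySem.List.length_pySetD]
    · intro j hj
      interval_cases j
      rw [PySem.List.pyGetD_zero_cons]
      have h0 : PySem.List.pySetD (List.replicate (a :: t).length (0 : Int)) 0 a
          = (List.replicate (a :: t).length (0 : Int)).set 0 a := by
        exact_mod_cast PySem.List.pySetD_natCast (List.replicate (a :: t).length (0 : Int)) 0 a
      rw [h0, pvGetD_set_self _ _ _ _ (by simp)]
      rfl
  | succ m ih =>
    have hm' : m + 1 ≤ t.length := by omega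
    obtain ⟨ihlen, ihget⟩ := ih hm'
    have hr : PySem.List.pyRange 1 (1 + ((m + 1 : Nat) : Int)) = PySem.List.pyRange 1 (1 + (m : Int)) ++ [1 + (m : Int)] := by
      have : (1 + ((m + 1 : Nat) : Int)) = (1 + (m : Int)) + 1 := by push_cast; ring
      rw [this, PySem.List.pyRange_one_succ_right (by omega)]
    rw [hr, List.foldl_append]
    set L := ((PySem.List.pyRange 1 (1 + (m : Int))).foldl
        (fun mp i => PySem.List.pySetD mp i (max (PySem.List.pyGetD mp (i - 1) 0) (PySem.List.pyGetD (a :: t) i 0)))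
        (PySem.List.pySetD (List.replicate (a :: t).length (0 : Int)) 0 (PySem.List.pyGetD (a :: t) 0 0))) with hL
    simp only [List.foldl_cons, List.foldl_nil]
    have e1 : (1 : Int) + (m : Int) - 1 = ((m : Nat) : Int) := by omega
    have e2 : (1 : Int) + (m : Int) = ((m + 1 : Nat) : Int) := by push_cast; ring
    rw [e1, e2, PySem.List.pyGetD_natCast, PySem.List.pyGetD_natCast, PySem.List.pySetD_natCast]
    have hval : max (L.getD m 0) ((a :: t).getD (m + 1) 0) = pvPmax a t (m + 1) := by
      rw [ihget m (le_refl m), pvPmax_succ a t m (by omega)]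
      simp [List.getD]
    constructor
    · simp [ihlen]
    · intro j hj
      by_cases hje : j = m + 1
      · subst hje
        rw [pvGetD_set_self _ _ _ _ (by rw [ihlen]; simp; omega), hval]
      · rw [pvGetD_set_ne _ _ _ _ _ hje]
        exact ihget j (by omega)

lemma pvMsLoop (A : List Int) (hn : 2 ≤ A.length) (k : Nat) :
    ∀ (L : List Int), k ≤ A.length - 2 → L.length = A.length →
    (∀ j : Nat, k < j → j ≤ A.length - 1 → L.getD j 0 = pvSmin A j) →
    (((PySem.List.pyRange (k : Int) 0 (-1)).foldl
        (fun ms i => PySem.List.pySetD ms i (min (PySem.List.pyGetD ms (i + 1) 0) (PySem.List.pyGetD A i 0))) L).length = A.length ∧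
     ∀ j : Nat, 1 ≤ j → j ≤ A.length - 1 →
      ((PySem.List.pyRange (k : Int) 0 (-1)).foldl
        (fun ms i => PySem.List.pySetD ms i (min (PySem.List.pyGetD ms (i + 1) 0) (PySem.List.pyGetD A i 0))) L).getD j 0 = pvSmin A j) := by
  induction k with
  | zero =>
    intro L _ hlen hget
    rw [PySem.List.pyRange_neg_one_eq_nil (by omega)]
    exact ⟨hlen, fun j h1 h2 => hget j (by omega) h2⟩
  | succ k ih =>
    intro L hk hlen hget
    rw [PySem.List.pyRange_neg_one_cons (by exact_mod_cast Nat.cast_pos.mpr (Nat.succ_pos k))]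
    have ek : ((k + 1 : Nat) : Int) - 1 = (k : Int) := by omega
    simp only [List.foldl_cons]
    rw [ek]
    have e2 : ((k + 1 : Nat) : Int) + 1 = ((k + 2 : Nat) : Int) := by omega
    have hv : min (PySem.List.pyGetD L (((k + 1 : Nat) : Int) + 1) 0) (PySem.List.pyGetD A ((k + 1 : Nat) : Int) 0)
        = pvSmin A (k + 1) := by
      rw [e2, PySem.List.pyGetD_natCast, PySem.List.pyGetD_natCast]
      rw [hget (k + 2) (by omega) (by omega)]
      rw [pvSmin_eq A (k + 1) (by omega)]
    rw [PySem.List.pySetD_natCast, hv]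
    exact ih (L.set (k + 1) (pvSmin A (k + 1))) (by omega) (by simp [hlen])
      (fun j hj1 hj2 => by
        by_cases hje : j = k + 1
        · subst hje
          exact pvGetD_set_self _ _ _ _ (by omega)
        · rw [pvGetD_set_ne _ _ _ _ _ hje]
          exact hget j (by omega) hj2)

lemma pvSmin_last (A : List Int) (h : A ≠ []) :
    pvSmin A (A.length - 1) = A.getD (A.length - 1) 0 := by
  have h0 : A.length - 1 < A.length := by
    cases A with | nil => simp at h | cons x xs => simp
  have hd : A.drop (A.length - 1) = A[A.length - 1] :: A.drop (A.length - 1 + 1) :=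
    List.drop_eq_getElem_cons h0
  have hnil : A.drop (A.length - 1 + 1) = [] := List.drop_eq_nil_of_le (by omega)
  unfold pvSmin
  rw [hd, hnil]
  simp [List.getD, List.getElem?_eq_getElem h0]

lemma pvMpChar (a : Int) (t : List Int) (j : Nat) (ht : 1 ≤ t.length) (hj2 : j ≤ (a :: t).length - 2) :
    PySem.List.pyGetD
      ((PySem.List.pyRange 1 (((a :: t).length : Int) - 1)).foldl
        (fun mp i => PySem.List.pySetD mp i (max (PySem.List.pyGetD mp (i - 1) 0) (PySem.List.pyGetD (a :: t) i 0)))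
        (PySem.List.pySetD (List.replicate (a :: t).length (0 : Int)) 0 (PySem.List.pyGetD (a :: t) 0 0)))
      ((j : Nat) : Int) 0 = pvPmax a t j := by
  have hn : (a :: t).length = t.length + 1 := by simp
  have he : (((a :: t).length : Int) - 1) = 1 + ((t.length - 1 : Nat) : Int) := by
    simp only [List.length_cons]
    omega
  rw [he]
  obtain ⟨hlen, hget⟩ := pvMpLoop a t (t.length - 1) (by omega)
  rw [PySem.List.pyGetD_natCast]
  exact hget j (by simp only [List.length_cons] at hj2; omega)

lemma pvMsChar (A : List Int) (j : Nat) (hj1 : 1 ≤ j) (hj2 : j ≤ A.length - 2) (hn : 3 ≤ A.length) :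
    PySem.List.pyGetD
      ((PySem.List.pyRange ((A.length : Int) - 2) 0 (-1)).foldl
        (fun ms i => PySem.List.pySetD ms i (min (PySem.List.pyGetD ms (i + 1) 0) (PySem.List.pyGetD A i 0)))
        (PySem.List.pySetD (List.replicate A.length (0 : Int)) ((A.length : Int) - 1) (PySem.List.pyGetD A ((A.length : Int) - 1) 0)))
      ((j : Nat) : Int) 0 = pvSmin A j := by
  have hAne : A ≠ [] := by intro h; subst h; simp at hn
  have e1 : ((A.length : Int) - 2) = ((A.length - 2 : Nat) : Int) := by omega
  have e2 : ((A.length : Int) - 1) = ((A.length - 1 : Nat) : Int) := by omega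
  rw [e1, e2, PySem.List.pyGetD_natCast, PySem.List.pySetD_natCast, PySem.List.pyGetD_natCast]
  obtain ⟨hlen, hget⟩ := pvMsLoop A (by omega) (A.length - 2)
    ((List.replicate A.length (0 : Int)).set (A.length - 1) (A.getD (A.length - 1) 0))
    (by omega) (by simp)
    (fun j' hj1' hj2' => by
      have hje : j' = A.length - 1 := by omega
      subst hje
      rw [pvGetD_set_self _ _ _ _ (by simp; omega), pvSmin_last A hAne])
  exact hget j hj1 (by omega)

lemma pvMaxSlice (a : Int) (t : List Int) (j : Nat) :
    (PySem.List.max? (PySem.List.slice (a :: t) none (some (((j : Nat) : Int) + 1))) (fun x => x)).getD 0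
      = pvPmax a t j := by
  rw [PySem.List.slice_to _ (by omega)]
  have : ((j : Int) + 1).toNat = j + 1 := by omega
  rw [this, List.take_succ_cons, PySem.List.max?_id_cons]
  rfl

lemma pvMinSlice (A : List Int) (j : Nat) (hj : j < A.length) :
    (PySem.List.min? (PySem.List.slice A (some ((j : Nat) : Int)) none) (fun x => x)).getD 0
      = pvSmin A j := by
  rw [PySem.List.slice_from _ (by omega)]
  have ht : ((j : Int)).toNat = j := by omega
  rw [ht]
  have hd : A.drop j = A[j] :: A.drop (j + 1) := List.drop_eq_getElem_cons hj
  rw [hd, PySem.List.min?_id_cons]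
  unfold pvSmin
  rw [hd]
  rfl


lemma pvCondSwap (p sm x acc : Int) :
    (if p == sm && p == x then x else acc) = (if x == p && x == sm then x else acc) := by
  by_cases h1 : p = x
  · subst h1
    rw [Bool.and_comm]
  · simp [beq_iff_eq, h1, Ne.symm h1]

-- ===== VERDICT (by name: the statement is the Claim_ definition above) =====
-- perfectPeak_raises: the raise region (the empty list) lies outside Pre_, and B's port returns 0 there.
theorem perfectPeak_raises : Claim_raises_perfectPeak := by
  unfold Claim_raises_perfectPeak
  exact ⟨fun A _ h hp => hp h, by decide⟩

theorem perfectPeak_spec : Claim_equal_perfectPeak := by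
  intro A hdom hpre
  -- nonemptiness: the raise region of perfectPeak_raises (A = []) is exactly what Pre_ excludes
  have hne : A ≠ [] := fun hnil => (perfectPeak_raises.1 A hdom hnil) hpre
  obtain ⟨a, t, rfl⟩ := List.exists_cons_of_ne_nil hne
  unfold Spec_perfectPeak perfectPeak perfectPeak_alt
  dsimp only
  have hfound :
      List.foldl
        (fun found i =>
          if
              (PySem.List.pyGetD
                      (List.foldl
                        (fun mp i =>
                          PySem.List.pySetD mp i
                            (max (PySem.List.pyGetD mp (i - 1) 0) (PySem.List.pyGetD (a :: t) i 0)))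
                        (PySem.List.pySetD (List.replicate (a :: t).length 0) 0 (PySem.List.pyGetD (a :: t) 0 0))
                        (PySem.List.pyRange 1 (↑(a :: t).length - 1)))
                      i 0 ==
                    PySem.List.pyGetD
                      (List.foldl
                        (fun ms i =>
                          PySem.List.pySetD ms i
                            (min (PySem.List.pyGetD ms (i + 1) 0) (PySem.List.pyGetD (a :: t) i 0)))
                        (PySem.List.pySetD (List.replicate (a :: t).length 0) (↑(a :: t).length - 1)
                          (PySem.List.pyGetD (a :: t) (↑(a :: t).length - 1) 0))
                        (PySem.List.pyRange (↑(a :: t).length - 2) 0 (-1)))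
                      i 0 &&
                  PySem.List.pyGetD
                      (List.foldl
                        (fun mp i =>
                          PySem.List.pySetD mp i
                            (max (PySem.List.pyGetD mp (i - 1) 0) (PySem.List.pyGetD (a :: t) i 0)))
                        (PySem.List.pySetD (List.replicate (a :: t).length 0) 0 (PySem.List.pyGetD (a :: t) 0 0))
                        (PySem.List.pyRange 1 (↑(a :: t).length - 1)))
                      i 0 ==
                    PySem.List.pyGetD (a :: t) i 0) =
                true then
            PySem.List.pyGetD (a :: t) i 0
          else found)
        (-1) (PySem.List.pyRange 1 (↑(a :: t).length - 1)) =
      List.foldl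
        (fun found i =>
          if
              (PySem.List.pyGetD (a :: t) i 0 ==
                    (PySem.List.max? (PySem.List.slice (a :: t) none (some (i + 1))) fun x => x).getD 0 &&
                  PySem.List.pyGetD (a :: t) i 0 ==
                    (PySem.List.min? (PySem.List.slice (a :: t) (some i) none) fun x => x).getD 0) =
                true then
            PySem.List.pyGetD (a :: t) i 0
          else found)
        (-1) (PySem.List.pyRange 1 (↑(a :: t).length - 1)) := by
    apply PySem.List.foldl_congr_mem
    intro acc i hi
    rw [PySem.List.mem_pyRange_one] at hi
    simp only [List.length_cons] at hi
    have hn3 : 3 ≤ (a :: t).length := by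
      simp only [List.length_cons]
      omega
    obtain ⟨j, rfl⟩ : ∃ j : Nat, i = (j : Int) := ⟨i.toNat, by omega⟩
    have hj1 : 1 ≤ j := by omega
    have hj2 : j ≤ (a :: t).length - 2 := by
      simp only [List.length_cons]
      omega
    rw [pvMpChar a t j (by simp only [List.length_cons] at hn3; omega) hj2,
        pvMsChar (a :: t) j hj1 hj2 hn3,
        pvMaxSlice a t j,
        pvMinSlice (a :: t) j (by simp only [List.length_cons]; omega)]
    exact pvCondSwap _ _ _ _
  rw [hfound]
  generalize (List.foldl
        (fun found i =>
          if
              (PySem.List.pyGetD (a :: t) i 0 ==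
                    (PySem.List.max? (PySem.List.slice (a :: t) none (some (i + 1))) fun x => x).getD 0 &&
                  PySem.List.pyGetD (a :: t) i 0 ==
                    (PySem.List.min? (PySem.List.slice (a :: t) (some i) none) fun x => x).getD 0) =
                true then
            PySem.List.pyGetD (a :: t) i 0
          else found)
        (-1) (PySem.List.pyRange 1 (↑(a :: t).length - 1))) = F
  by_cases hf : F = -1
  · simp [hf]
  · simp only [if_neg hf]
    have hc : List.foldl (fun c i => if PySem.List.pyGetD (a :: t) i 0 == F then c + 1 else c) 0
        (PySem.List.pyRange 0 ↑(a :: t).length)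
        = ((List.countP (fun x => x == F) (a :: t) : Nat) : Int) := by
      rw [PySem.List.foldl_pyRange_zero_pyGetD' (a :: t) 0 (fun c x => if x == F then c + 1 else c) 0]
      rw [PySem.List.foldl_count_if (fun x => x == F) (a :: t) 0]
      simp
    rw [hc, PySem.List.count_eq]
    have hcp : List.count F (a :: t) = List.countP (fun x => x == F) (a :: t) := by
      simp [List.count]
    rw [← hcp]
    by_cases hcnt : List.count F (a :: t) = 1 <;> simp [hcnt]
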